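-- pv_equiv track=rewrite | github.com/TaeTanakrit0089/PSCP-Code | Week13/08.AndAgainAndAgainAndAgainAndAgainAndAgainAndAgain Home Course .py | gusfring
-- ===== SOURCE A (Python) =====
-- def gusfring(text):
--     '''Los Pollos Hermanos'''
--     all_count = 0
--     vowels = ['a', 'e', 'i', 'o', 'u']
--     for i in vowels:
--         all_count += text.lower().count(i)
--     if all_count < 2:
--         return True
--     return False
-- ===== SOURCE B (Python) =====
-- def gusfring(text):
--     '''Los Pollos Hermanos'''
--     vowels = {'a', 'e', 'i', 'o', 'u'}
--     count = 0
--     for ch in text.lower():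
--         if ch in vowels:
--             count += 1
--             if count == 2:
--                 return False
--     return True
-- ===== Notes on version B (the rewrite author's own statement) =====
-- stated objective: idiomatic
-- what changed: Replaces five .count() scans (each re-lowercasing the text) with a single pass over the lowered text keeping a vowel counter and returning False as soon as it reaches 2.
import Mathlib
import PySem

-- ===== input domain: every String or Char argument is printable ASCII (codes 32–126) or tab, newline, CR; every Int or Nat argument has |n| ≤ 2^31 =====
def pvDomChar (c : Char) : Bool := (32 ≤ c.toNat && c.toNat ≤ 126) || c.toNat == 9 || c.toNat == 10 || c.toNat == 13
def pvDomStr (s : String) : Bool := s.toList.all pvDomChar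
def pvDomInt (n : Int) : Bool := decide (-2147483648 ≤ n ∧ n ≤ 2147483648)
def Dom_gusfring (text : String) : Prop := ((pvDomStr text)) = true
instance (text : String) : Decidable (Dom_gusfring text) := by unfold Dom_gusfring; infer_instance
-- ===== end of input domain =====

-- B replaces A's five .count() scans (each one re-lowercasing the text) with a single pass
-- over the lowered text keeping a vowel counter, returning False as soon as it reaches 2 (idiomatic).

-- ===== PORT A =====
def gusfring (text : String) : Bool :=
  let vowels : List Char := ['a', 'e', 'i', 'o', 'u']
  let all_count : Int :=
    vowels.foldl (fun acc i => acc + (PySem.Str.count (PySem.Str.lower text) (String.mk [i]) : Int)) 0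
  if all_count < 2 then true else false

-- ===== PORT B =====
def pvVowelSet : PySem.Set Char := PySem.Set.ofList ['a', 'e', 'i', 'o', 'u']

def pvLoopB : List Char → Nat → Bool
  | [], _ => true
  | c :: rest, count =>
    if pvVowelSet.contains c then
      if count + 1 == 2 then false else pvLoopB rest (count + 1)
    else pvLoopB rest count

def gusfring_alt (text : String) : Bool :=
  pvLoopB (PySem.Str.lower text).toList 0

-- ===== PRECONDITION & SPEC =====
def Spec_gusfring (text : String) (out : Bool) : Prop := out = gusfring_alt text
instance (text : String) (out : Bool) : Decidable (Spec_gusfring text out) := by unfold Spec_gusfring; infer_instance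

-- ===== CLAIM (what is proved, stated in full; the proofs are below) =====
def Claim_equal_gusfring : Prop := ∀ (text : String), Dom_gusfring text → Spec_gusfring text (gusfring text)

-- ===== LEMMAS AND PROOFS =====

-- counting a single-character needle with Python's str.count is counting that character
lemma count_go_singleton (c : Char) :
    ∀ (l : List Char) (fuel acc : Nat), l.length ≤ fuel →
      PySem.Chars.count.go [c] fuel l acc = acc + l.count c := by
  intro l
  induction l with
  | nil =>
    intro fuel acc _
    cases fuel <;> simp [PySem.Chars.count.go]
  | cons h t ih =>
    intro fuel acc hf
    cases fuel with
    | zero => simp at hf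
    | succ n =>
      simp only [PySem.Chars.count.go]
      by_cases hc : h = c
      · subst hc
        simp only [List.isPrefixOf, List.isPrefixOf_nil_left, beq_self_eq_true, Bool.true_and,
          if_pos]
        rw [show [h].length = 1 from rfl, List.drop_one, List.tail_cons,
          ih n (acc + 1) (by simpa using Nat.lt_succ_iff.mp (Nat.lt_of_lt_of_le (by simp) hf))]
        simp [List.count_cons]
        omega
      · have : ([c].isPrefixOf (h :: t)) = false := by
          simp [List.isPrefixOf]
          exact fun h' => absurd h'.symm hc
        rw [this]
        simp only [Bool.false_eq_true, if_false]
        rw [ih n acc (by simpa using Nat.succ_le_succ_iff.mp hf)]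
        simp [List.count_cons, hc]

lemma chars_count_singleton (l : List Char) (c : Char) :
    PySem.Chars.count l [c] = l.count c := by
  simp [PySem.Chars.count, count_go_singleton c l l.length 0 le_rfl]

-- the early-exit loop computes "fewer than 2 vowels, counting those already seen"
lemma loopB_eq (l : List Char) : ∀ count : Nat, count < 2 →
    pvLoopB l count = decide (count + l.countP (fun x => pvVowelSet.contains x) < 2) := by
  induction l with
  | nil =>
    intro count h
    simp only [pvLoopB, List.countP_nil, Nat.add_zero]
    exact (decide_eq_true h).symm
  | cons c t ih =>
    intro count h
    rw [show pvLoopB (c :: t) count =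
          (if pvVowelSet.contains c then
            (if count + 1 == 2 then false else pvLoopB t (count + 1))
          else pvLoopB t count) from rfl,
        List.countP_cons]
    by_cases hc : pvVowelSet.contains c = true
    · rw [if_pos hc, hc, if_pos rfl]
      by_cases h2 : count + 1 = 2
      · rw [if_pos (show (count + 1 == 2) = true by simp [h2])]
        have hlt : ¬ (count + (t.countP (fun x => pvVowelSet.contains x) + 1) < 2) := by omega
        exact (decide_eq_false hlt).symm
      · rw [if_neg (show ¬ (count + 1 == 2) = true by simp; omega)]
        rw [ih (count + 1) (by omega)]
        simp only [decide_eq_decide]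
        omega
    · rw [if_neg hc]
      rw [Bool.not_eq_true] at hc
      rw [hc, if_neg (by simp), Nat.add_zero, ih count h]

-- membership in the vowel set, spelled out
lemma contains_vowelSet (c : Char) :
    pvVowelSet.contains c = (c == 'a' || c == 'e' || c == 'i' || c == 'o' || c == 'u') := by
  simp only [pvVowelSet]
  by_cases ha : c = 'a' <;> by_cases he : c = 'e' <;> by_cases hi : c = 'i' <;>
    by_cases ho : c = 'o' <;> by_cases hu : c = 'u' <;>
    simp_all [PySem.Set.contains, PySem.Set.ofList]

-- counting characters in the vowel set = summing the five per-vowel counts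
lemma countP_vowels (l : List Char) :
    l.countP (fun x => pvVowelSet.contains x) =
      l.count 'a' + l.count 'e' + l.count 'i' + l.count 'o' + l.count 'u' := by
  have hp : (fun x => pvVowelSet.contains x) =
      (fun x => x == 'a' || x == 'e' || x == 'i' || x == 'o' || x == 'u') :=
    funext contains_vowelSet
  rw [hp]
  induction l with
  | nil => simp
  | cons c t ih =>
    simp only [List.countP_cons, List.count_cons, ih]
    by_cases ha : c = 'a' <;> by_cases he : c = 'e' <;> by_cases hi : c = 'i' <;>
      by_cases ho : c = 'o' <;> by_cases hu : c = 'u' <;>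
      simp [ha, he, hi, ho, hu] <;> omega

-- ===== VERDICT (by name: the statement is the Claim_ definition above) =====
theorem gusfring_spec : Claim_equal_gusfring := by
  intro text _
  unfold Spec_gusfring gusfring gusfring_alt
  simp only [List.foldl, PySem.Str.count_eq, PySem.Str.toList_lower]
  set l := PySem.Chars.lower text.toList with hl
  rw [show (String.mk ['a']).toList = ['a'] from rfl, show (String.mk ['e']).toList = ['e'] from rfl,
      show (String.mk ['i']).toList = ['i'] from rfl, show (String.mk ['o']).toList = ['o'] from rfl,
      show (String.mk ['u']).toList = ['u'] from rfl,
      chars_count_singleton l 'a', chars_count_singleton l 'e', chars_count_singleton l 'i',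
      chars_count_singleton l 'o', chars_count_singleton l 'u',
      loopB_eq l 0 (by omega), countP_vowels l]
  simp only [Nat.zero_add]
  by_cases h : l.count 'a' + l.count 'e' + l.count 'i' + l.count 'o' + l.count 'u' < 2
  · rw [if_pos (by push_cast; omega)]
    simp [h]
  · rw [if_neg (by push_cast; omega)]
    simp [h]
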